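-- pv_equiv track=rewrite | github.com/dorriklabs/mail2rag | mail2rag/services/utils.py | truncate_log
-- ===== SOURCE A (Python) =====
-- from typing import Any, Optional
--
-- def truncate_log(
--     content: Any,
--     head: int = 5,
--     tail: int = 3,
--     max_line_length: int = 500,
-- ) -> str:
--     """
--     Truncate log content for readability.
--     Keeps first N and last M lines, truncates long lines.
--
--     Args:
--         content: Log content to truncate (any type, converted to str)
--         head: Number of lines to keep at start (default: 5)
--         tail: Number of lines to keep at end (default: 3)
--         max_line_length: Maximum length per line (default: 500)
--
--     Returns:
--         str: Truncated log content
--     """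
--     if not isinstance(content, str):
--         content = str(content)
--
--     lines = content.splitlines()
--     truncated_lines = []
--
--     for line in lines:
--         if len(line) > max_line_length:
--             truncated_lines.append(
--                 line[:max_line_length] + " ... [TRONQUÉ] ..."
--             )
--         else:
--             truncated_lines.append(line)
--
--     lines = truncated_lines
--
--     # Rien ou peu de lignes : on renvoie tel quel
--     if len(lines) <= head + tail + 1:
--         return "\n".join(lines)
--
--     hidden_count = len(lines) - (head + tail)
--
--     return (
--         "\n".join(lines[:head])
--         + f"\n... [{hidden_count} LIGNES MASQUÉES] ...\n"
--         + "\n".join(lines[-tail:])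
--     )
-- ===== SOURCE B (Python) =====
-- def truncate_log(content, head=5, tail=3, max_line_length=500):
--     if not isinstance(content, str):
--         content = str(content)
--
--     lines = content.splitlines()
--     n = len(lines)
--     parts = []
--     i = 0
--     # single index-driven pass: emit each kept line once, jump over the hidden middle
--     while i < n:
--         if n > head + tail + 1 and i == head:
--             parts.append(f"... [{n - head - tail} LIGNES MASQUÉES] ...")
--             i = n - tail
--             continue
--         line = lines[i]
--         if len(line) > max_line_length:
--             line = line[:max_line_length] + " ... [TRONQUÉ] ..."
--         parts.append(line)
--         i += 1
--     return "\n".join(parts)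
-- ===== Notes on version B (the rewrite author's own statement) =====
-- stated objective: alternative
-- what changed: A clips every line into a new list and then slices/joins three blocks; B is a single index-driven loop with an accumulator that emits each kept (clipped) line once and jumps over the hidden middle, never materializing a clipped copy of the whole log.
-- intended difference: On long logs with head=0 or tail=0, A returns a malformed report (tail=0 makes lines[-0:] the whole log, so the entire log is repeated after the masked marker; head=0 adds a stray leading newline), while B returns just head lines, marker and tail lines, the intended truncation. — e.g. on truncate_log("a\nb\nc\nd\ne", 1, 0, 500): A returns "a\n... [4 LIGNES MASQUÉES] ...\na\nb\nc\nd\ne", B returns "a\n... [4 LIGNES MASQUÉES] ..."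
-- outside the precondition, e.g. on truncate_log('ab', -1, -1, -1): A returns '\n... [3 LIGNES MASQUÉES] ...\n', B returns 'a ... [TRONQUÉ] ...'
import Mathlib
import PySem

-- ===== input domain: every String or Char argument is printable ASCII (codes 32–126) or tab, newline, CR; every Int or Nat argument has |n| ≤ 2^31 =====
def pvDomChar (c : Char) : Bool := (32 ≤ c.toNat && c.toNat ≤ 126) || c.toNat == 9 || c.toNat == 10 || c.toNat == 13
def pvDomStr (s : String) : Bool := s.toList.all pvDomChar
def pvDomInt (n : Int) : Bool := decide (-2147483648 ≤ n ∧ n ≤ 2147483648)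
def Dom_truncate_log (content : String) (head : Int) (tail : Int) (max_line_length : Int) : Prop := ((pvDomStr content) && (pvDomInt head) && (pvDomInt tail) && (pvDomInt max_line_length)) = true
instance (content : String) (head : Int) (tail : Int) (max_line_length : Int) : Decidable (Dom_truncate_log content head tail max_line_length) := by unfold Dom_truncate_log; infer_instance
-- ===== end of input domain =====

-- B replaces A's staged passes (clip every line, then slice and join three blocks) by one
-- index-driven loop that emits each kept line once and jumps over the hidden middle.

-- ===== PORT A =====
def truncate_log (content : String) (head : Int) (tail : Int) (max_line_length : Int) : String :=
  let lines := PySem.Str.splitlines content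
  let truncated_lines : List String := lines.foldl (fun acc line =>
      if PySem.Str.len line > max_line_length then
        acc ++ [PySem.Str.slice line none (some max_line_length) ++ " ... [TRONQUÉ] ..."]
      else
        acc ++ [line]) []
  let lines := truncated_lines
  if PySem.List.len lines ≤ head + tail + 1 then
    PySem.Str.join "\n" lines
  else
    let hidden_count := PySem.List.len lines - (head + tail)
    PySem.Str.join "\n" (PySem.List.slice lines none (some head))
      ++ "\n... [" ++ PySem.Int.toStr hidden_count ++ " LIGNES MASQUÉES] ...\n"
      ++ PySem.Str.join "\n" (PySem.List.slice lines (some (-tail)) none)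

-- ===== PORT B =====
-- Source B's while-loop: index i, accumulator parts; at i = head (long case) it appends the
-- marker and jumps to n - tail, otherwise it appends the (clipped) current line.
def pvLoopB (lines : List String) (head : Int) (tail : Int) (m : Int) : Nat → Int → List String → List String
  | 0, _, parts => parts        -- fuel exhausted; never reached from the initial fuel below
  | fuel + 1, i, parts =>
    if i < PySem.List.len lines then
      (if PySem.List.len lines > head + tail + 1 ∧ i = head then
        pvLoopB lines head tail m fuel (PySem.List.len lines - tail)
          (parts ++ ["... [" ++ PySem.Int.toStr (PySem.List.len lines - head - tail) ++ " LIGNES MASQUÉES] ..."])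
      else
        -- lines[i]: every reachable call has 0 ≤ i < len(lines), so the getD default is never used
        let line := (PySem.List.pyGet? lines i).getD ""
        let line := if PySem.Str.len line > m then
            PySem.Str.slice line none (some m) ++ " ... [TRONQUÉ] ..."
          else line
        pvLoopB lines head tail m fuel (i + 1) (parts ++ [line]))
    else parts

def truncate_log_alt (content : String) (head : Int) (tail : Int) (max_line_length : Int) : String :=
  PySem.Str.join "\n"
    (pvLoopB (PySem.Str.splitlines content) head tail max_line_length
      ((PySem.Str.splitlines content).length + 1) 0 [])

-- ===== PRECONDITION & SPEC =====
-- Pre_ restricts to the task's natural domain of nonnegative head/tail line counts; A still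
-- returns on negative counts, but only via Python's negative-slice wraparound (lines[:head]
-- / lines[-tail:] then denote accidental blocks), which B's forward loop does not reproduce.
def Pre_truncate_log (content : String) (head : Int) (tail : Int) (max_line_length : Int) : Prop :=
  0 ≤ head ∧ 0 ≤ tail
instance (content : String) (head : Int) (tail : Int) (max_line_length : Int) : Decidable (Pre_truncate_log content head tail max_line_length) := by unfold Pre_truncate_log; infer_instance

def pvWitness_truncate_log : String × Int × Int × Int := ("a\nbb\nccc\ndd\ne\nf\ng", 2, 1, 2)

-- On long logs with head = 0 or tail = 0, A returns a malformed report — tail = 0 makes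
-- lines[-0:] the WHOLE log, so the entire log is repeated after the "LIGNES MASQUÉES"
-- marker, and head = 0 emits a stray leading newline — while B returns just the head
-- lines, the marker and the tail lines, which is the intended truncation.
def D_truncate_log (content : String) (head : Int) (tail : Int) (max_line_length : Int) : Prop :=
  ((PySem.Str.splitlines content).length : Int) > head + tail + 1 ∧ (head = 0 ∨ tail = 0)
instance (content : String) (head : Int) (tail : Int) (max_line_length : Int) : Decidable (D_truncate_log content head tail max_line_length) := by unfold D_truncate_log; infer_instance

def Spec_truncate_log (content : String) (head : Int) (tail : Int) (max_line_length : Int) (out : String) : Prop := ¬ D_truncate_log content head tail max_line_length → out = truncate_log_alt content head tail max_line_length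
instance (content : String) (head : Int) (tail : Int) (max_line_length : Int) (out : String) : Decidable (Spec_truncate_log content head tail max_line_length out) := by unfold Spec_truncate_log; infer_instance

def pvDiffWitness_truncate_log : String × Int × Int × Int := ("a\nb\nc\nd\ne", 1, 0, 500)
def pvDiffWitnessOut_truncate_log : String × String :=
  ("a\n... [4 LIGNES MASQUÉES] ...\na\nb\nc\nd\ne", "a\n... [4 LIGNES MASQUÉES] ...")

-- ===== CLAIM (what is proved, stated in full; the proofs are below) =====
def Claim_unchanged_truncate_log : Prop := ∀ (content : String) (head : Int) (tail : Int) (max_line_length : Int), Dom_truncate_log content head tail max_line_length → Pre_truncate_log content head tail max_line_length → Spec_truncate_log content head tail max_line_length (truncate_log content head tail max_line_length)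
def Claim_changed_truncate_log : Prop := Dom_truncate_log (pvDiffWitness_truncate_log.1) (pvDiffWitness_truncate_log.2.1) (pvDiffWitness_truncate_log.2.2.1) (pvDiffWitness_truncate_log.2.2.2) ∧ Pre_truncate_log (pvDiffWitness_truncate_log.1) (pvDiffWitness_truncate_log.2.1) (pvDiffWitness_truncate_log.2.2.1) (pvDiffWitness_truncate_log.2.2.2) ∧ D_truncate_log (pvDiffWitness_truncate_log.1) (pvDiffWitness_truncate_log.2.1) (pvDiffWitness_truncate_log.2.2.1) (pvDiffWitness_truncate_log.2.2.2) ∧ truncate_log (pvDiffWitness_truncate_log.1) (pvDiffWitness_truncate_log.2.1) (pvDiffWitness_truncate_log.2.2.1) (pvDiffWitness_truncate_log.2.2.2) = pvDiffWitnessOut_truncate_log.1 ∧ truncate_log_alt (pvDiffWitness_truncate_log.1) (pvDiffWitness_truncate_log.2.1) (pvDiffWitness_truncate_log.2.2.1) (pvDiffWitness_truncate_log.2.2.2) = pvDiffWitnessOut_truncate_log.2 ∧ pvDiffWitnessOut_truncate_log.1 ≠ pvDiffWitnessOut_truncate_log.2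

def Claim_exact_truncate_log : Prop := ∀ (content : String) (head : Int) (tail : Int) (max_line_length : Int), Dom_truncate_log content head tail max_line_length → Pre_truncate_log content head tail max_line_length → D_truncate_log content head tail max_line_length → truncate_log content head tail max_line_length ≠ truncate_log_alt content head tail max_line_length

-- ===== LEMMAS AND PROOFS =====

-- the per-line clipping rule, shared shape of both ports' line handling (proof-side helper)
def pvClip (m : Int) (line : String) : String :=
  if PySem.Str.len line > m then PySem.Str.slice line none (some m) ++ " ... [TRONQUÉ] ..." else line

-- the masked-middle marker line
def pvMark (n head tail : Int) : String :=
  "... [" ++ PySem.Int.toStr (n - head - tail) ++ " LIGNES MASQUÉES] ..."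

-- A's append-accumulating clip loop is exactly a map of the clip function.
theorem pv_foldl_clip (m : Int) (xs : List String) (acc : List String) :
    xs.foldl (fun acc line =>
      if PySem.Str.len line > m then
        acc ++ [PySem.Str.slice line none (some m) ++ " ... [TRONQUÉ] ..."]
      else
        acc ++ [line]) acc = acc ++ xs.map (pvClip m) := by
  induction xs generalizing acc with
  | nil => simp
  | cons x xs ih =>
    simp only [List.foldl_cons, List.map_cons, ih, pvClip]
    split <;> simp

theorem pv_slice_map (f : String → String) (xs : List String) (a? b? : Option Int) :
    PySem.List.slice (xs.map f) a? b? = (PySem.List.slice xs a? b?).map f := by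
  simp [PySem.List.slice, List.length_map]

-- B's loop when the jump can no longer fire (i already past head, or short log):
-- it is a plain clip-map of the remaining lines.
theorem pvLoopB_pass (lines : List String) (head tail m : Int) :
    ∀ (fuel : Nat) (j : Nat) (parts : List String),
      lines.length - j ≤ fuel →
      (head < (j : Int) ∨ ((lines.length : Int)) ≤ head + tail + 1) →
      pvLoopB lines head tail m fuel (j : Int) parts = parts ++ (lines.drop j).map (pvClip m) := by
  intro fuel
  induction fuel with
  | zero =>
    intro j parts hf _
    rw [List.drop_of_length_le (by omega)]
    simp [pvLoopB]
  | succ fuel ih =>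
    intro j parts hf hcond
    by_cases hj : j < lines.length
    · rw [pvLoopB]
      rw [if_pos (by simp only [PySem.List.len_eq]; exact_mod_cast hj)]
      rw [if_neg (by simp only [PySem.List.len_eq]
                     rcases hcond with h | h <;> simp <;> omega)]
      have hget : (PySem.List.pyGet? lines (j : Int)).getD "" = lines[j] := by simp [hj]
      have hstep : ((j : Int) + 1) = ((j + 1 : Nat) : Int) := by push_cast; ring
      rw [hget, hstep, ih (j + 1) _ (by omega)
        (by rcases hcond with h | h
            · left; omega
            · right; exact h)]
      rw [List.drop_eq_getElem_cons hj, List.map_cons]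
      simp [pvClip]
    · rw [pvLoopB]
      rw [if_neg (by simp only [PySem.List.len_eq]; exact_mod_cast hj)]
      rw [List.drop_of_length_le (by omega)]
      simp

-- B's loop in the head phase of a long log: clipped head lines, the marker, then the
-- clipped tail block.
theorem pvLoopB_head (lines : List String) (head tail m : Int)
    (hhead : 0 ≤ head) (htail : 0 ≤ tail) (hlong : (lines.length : Int) > head + tail + 1) :
    ∀ (fuel : Nat) (j : Nat) (parts : List String), (j : Int) ≤ head →
      head.toNat - j + 1 + tail.toNat ≤ fuel →
      pvLoopB lines head tail m fuel (j : Int) parts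
        = parts ++ ((lines.take head.toNat).drop j).map (pvClip m)
            ++ [pvMark (lines.length : Int) head tail]
            ++ (lines.drop (lines.length - tail.toNat)).map (pvClip m) := by
  intro fuel
  induction fuel with
  | zero => intro j parts _ hf; omega
  | succ fuel ih =>
    intro j parts hj hf
    have hjl : j < lines.length := by omega
    rw [pvLoopB]
    rw [if_pos (by simp only [PySem.List.len_eq]; exact_mod_cast hjl)]
    by_cases hje : (j : Int) = head
    · rw [if_pos ⟨by simp only [PySem.List.len_eq]; omega, hje⟩]
      have hcast : (PySem.List.len lines - tail) = ((lines.length - tail.toNat : Nat) : Int) := by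
        simp only [PySem.List.len_eq]; push_cast; omega
      rw [hcast, pvLoopB_pass lines head tail m fuel (lines.length - tail.toNat) _
        (by omega) (by left; push_cast; omega)]
      rw [List.drop_of_length_le (le_of_eq_of_le (List.length_take ..) (by omega))]
      simp only [PySem.List.len_eq]
      simp [pvMark]
    · have hjh : j < head.toNat := by omega
      rw [if_neg (by simp [hje])]
      have hget : (PySem.List.pyGet? lines (j : Int)).getD "" = lines[j] := by simp [hjl]
      have hstep : ((j : Int) + 1) = ((j + 1 : Nat) : Int) := by push_cast; ring
      rw [hget, hstep, ih (j + 1) _ (by push_cast; omega) (by omega)]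
      have htk : j < (lines.take head.toNat).length := by simp; omega
      rw [List.drop_eq_getElem_cons htk]
      simp [pvClip, List.getElem_take]

-- splitting a "\n".join over H ++ [x] ++ T with H and T nonempty
theorem pv_join_split (sep : String) (H T : List String) (x : String) (hH : H ≠ []) (hT : T ≠ []) :
    PySem.Str.join sep (H ++ x :: T)
      = PySem.Str.join sep H ++ sep ++ x ++ sep ++ PySem.Str.join sep T := by
  apply String.toList_inj.mp
  simp only [String.toList_append, PySem.Str.toList_join, List.map_append, List.map_cons]
  obtain ⟨t0, T', rfl⟩ := List.exists_cons_of_ne_nil hT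
  induction H with
  | nil => exact absurd rfl hH
  | cons h0 H' ih =>
    cases H' with
    | nil =>
      simp only [List.map_cons, List.map_nil, List.nil_append, List.cons_append,
        PySem.Chars.join_singleton, PySem.Chars.join_cons_cons]
      simp
    | cons h1 H'' =>
      simp only [List.map_cons, List.cons_append, PySem.Chars.join_cons_cons] at *
      rw [ih (by simp)]
      simp

-- the two ports agree (Pre_, outside D_)
theorem pv_eq_alt (content : String) (head tail m : Int)
    (hhead : 0 ≤ head) (htail : 0 ≤ tail)
    (hnd : ¬ D_truncate_log content head tail m) :
    truncate_log content head tail m = truncate_log_alt content head tail m := by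
  unfold truncate_log truncate_log_alt
  simp only [pv_foldl_clip, List.nil_append, PySem.List.len_eq, List.length_map]
  set lines := PySem.Str.splitlines content with hlines
  by_cases hshort : (lines.length : Int) ≤ head + tail + 1
  · rw [if_pos hshort]
    have h0 : (0 : Int) = ((0 : Nat) : Int) := by norm_num
    rw [h0, pvLoopB_pass lines head tail m (lines.length + 1) 0 [] (by omega) (Or.inr hshort)]
    simp
  · rw [if_neg hshort]
    have hlong : (lines.length : Int) > head + tail + 1 := by omega
    have hne : head ≠ 0 ∧ tail ≠ 0 := by
      by_contra hc
      apply hnd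
      unfold D_truncate_log
      rw [← hlines]
      refine ⟨hlong, ?_⟩
      rcases not_and_or.mp hc with h | h
      · left; omega
      · right; omega
    have hh1 : 1 ≤ head := by omega
    have ht1 : 1 ≤ tail := by omega
    have h0 : (0 : Int) = ((0 : Nat) : Int) := by norm_num
    rw [h0, pvLoopB_head lines head tail m hhead htail hlong (lines.length + 1) 0 [] (by omega) (by omega)]
    simp only [List.drop_zero, List.nil_append]
    -- A's slices, with clipping pushed outside
    rw [pv_slice_map, pv_slice_map]
    rw [PySem.List.slice_to]
    have htcast : -tail = -((tail.toNat : Nat) : Int) := by omega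
    rw [htcast, PySem.List.slice_from_neg_natCast lines tail.toNat (by omega)]
    have hnil : lines ≠ [] := by
      intro h; rw [h] at hlong; simp at hlong; omega
    have hH : (lines.take head.toNat).map (pvClip m) ≠ [] := by
      simp only [ne_eq, List.map_eq_nil_iff, List.take_eq_nil_iff, not_or]
      exact ⟨by omega, hnil⟩
    have hT : (lines.drop (lines.length - tail.toNat)).map (pvClip m) ≠ [] := by
      simp only [ne_eq, List.map_eq_nil_iff, List.drop_eq_nil_iff]
      omega
    have := pv_join_split "\n" ((lines.take head.toNat).map (pvClip m))
      ((lines.drop (lines.length - tail.toNat)).map (pvClip m))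
      (pvMark (lines.length : Int) head tail) hH hT
    rw [List.append_assoc, List.singleton_append, this]
    unfold pvMark
    have harith : (lines.length : Int) - (head + tail) = (lines.length : Int) - head - tail := by ring
    rw [harith]
    have hlit1 : ("\n... [" : String) = "\n" ++ "... [" := by decide
    have hlit2 : (" LIGNES MASQUÉES] ...\n" : String) = " LIGNES MASQUÉES] ..." ++ "\n" := by decide
    rw [hlit1, hlit2]
    -- both sides are the same concatenated strings, associated differently
    · simp [String.append_assoc]
      rw [hlit1, String.append_assoc]
    · exact hhead

-- join of the empty list is the empty string
theorem pv_join_empty (sep : String) : PySem.Str.join sep [] = "" := by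
  apply String.toList_inj.mp
  simp [PySem.Str.toList_join, PySem.Chars.join_nil]

-- length of a "sep".join over a nonempty list
theorem pv_join_len (sep : String) : ∀ (parts : List String), parts ≠ [] →
    (PySem.Str.join sep parts).toList.length
      = (parts.map (fun x => x.toList.length)).sum + sep.toList.length * (parts.length - 1) := by
  intro parts
  induction parts with
  | nil => intro h; exact absurd rfl h
  | cons p rest ih =>
    intro _
    cases rest with
    | nil =>
      have h1 : (PySem.Str.join sep [p]).toList = p.toList := by
        simp [PySem.Str.toList_join, PySem.Chars.join_singleton]
      rw [h1]; simp
    | cons q rest' =>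
      have h2 : (PySem.Str.join sep (p :: q :: rest')).toList
          = p.toList ++ sep.toList ++ (PySem.Str.join sep (q :: rest')).toList := by
        simp [PySem.Str.toList_join, PySem.Chars.join_cons_cons]
      rw [h2]
      simp only [List.length_append, ih (by simp), List.map_cons, List.sum_cons,
        List.length_cons]
      have c1 : rest'.length + 1 - 1 = rest'.length := by omega
      have c2 : rest'.length + 1 + 1 - 1 = rest'.length + 1 := by omega
      rw [c1, c2]
      ring

-- inside D_ the two ports always return different strings (A's is strictly longer)
theorem pv_ne_inside (content : String) (head tail m : Int)
    (hhead : 0 ≤ head) (htail : 0 ≤ tail)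
    (hD : D_truncate_log content head tail m) :
    truncate_log content head tail m ≠ truncate_log_alt content head tail m := by
  unfold D_truncate_log at hD
  unfold truncate_log truncate_log_alt
  simp only [pv_foldl_clip, List.nil_append, PySem.List.len_eq, List.length_map]
  set lines := PySem.Str.splitlines content with hlines
  obtain ⟨hlong, hzero⟩ := hD
  have hnil : lines ≠ [] := by
    intro h; rw [h] at hlong; simp at hlong; omega
  rw [if_neg (by omega)]
  have h0 : (0 : Int) = ((0 : Nat) : Int) := by norm_num
  rw [h0, pvLoopB_head lines head tail m hhead htail hlong (lines.length + 1) 0 [] (by omega) (by omega)]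
  simp only [List.drop_zero, List.nil_append]
  rw [pv_slice_map, pv_slice_map]
  rw [PySem.List.slice_to _ hhead]
  rw [List.append_assoc, List.singleton_append]
  unfold pvMark
  have l1 : ("\n... [" : String).toList.length = 6 := by decide
  have l2 : (" LIGNES MASQUÉES] ...\n" : String).toList.length = 22 := by decide
  have l3 : ("... [" : String).toList.length = 5 := by decide
  have l4 : (" LIGNES MASQUÉES] ..." : String).toList.length = 21 := by decide
  have l5 : ("\n" : String).toList.length = 1 := by decide
  by_cases ht0 : tail = 0
  · -- tail = 0: A appends the whole clipped log after the marker, B appends nothing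
    subst ht0
    have hsl : PySem.List.slice lines (some (-0)) none = lines := by
      rw [show (-(0 : Int)) = 0 from by norm_num]
      simp [PySem.List.slice_zero_start, PySem.List.slice_none_none]
    rw [hsl]
    rw [show Int.toNat 0 = 0 from rfl, Nat.sub_zero, List.drop_length, List.map_nil]
    intro heq
    have hlen := congrArg (fun x => x.toList.length) heq
    simp only [String.toList_append, List.length_append] at hlen
    have e3 := pv_join_len "\n" (lines.map (pvClip m)) (by simpa using hnil)
    by_cases hh0 : head = 0
    · subst hh0
      rw [show Int.toNat 0 = 0 from rfl, List.take_zero, List.map_nil, pv_join_empty,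
        List.nil_append] at hlen
      have e2 := pv_join_len "\n"
        [("... [" ++ PySem.Int.toStr (↑lines.length - 0 - 0) ++ " LIGNES MASQUÉES] ...")] (by simp)
      rw [e2, e3] at hlen
      simp only [List.map_cons, List.map_nil, List.sum_cons, List.sum_nil,
        String.toList_append, List.length_append, List.length_cons, List.length_nil,
        List.length_map, l1, l2, l3, l4, l5] at hlen
      have hl2 : 2 ≤ lines.length := by omega
      simp at hlen
      omega
    · have hHne : (lines.take head.toNat).map (pvClip m) ≠ [] := by
        simp only [ne_eq, List.map_eq_nil_iff, List.take_eq_nil_iff, not_or]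
        exact ⟨by omega, hnil⟩
      have e1 := pv_join_len "\n" ((lines.take head.toNat).map (pvClip m)) hHne
      have e2 := pv_join_len "\n" ((lines.take head.toNat).map (pvClip m) ++
        [("... [" ++ PySem.Int.toStr (↑lines.length - head - 0) ++ " LIGNES MASQUÉES] ...")])
        (by simp)
      rw [e1, e2, e3] at hlen
      simp only [List.map_append, List.sum_append, List.map_cons, List.map_nil,
        List.sum_cons, List.sum_nil, String.toList_append, List.length_append,
        List.length_cons, List.length_nil, List.length_map, l1, l2, l3, l4, l5] at hlen
      have hl2 : 2 ≤ lines.length := by omega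
      have hH1 : 1 ≤ (lines.take head.toNat).length := by
        simp only [List.length_take]; omega
      simp at hlen
      omega
  · -- head = 0 (and tail ≥ 1): A has a stray leading newline, B does not
    have hh0 : head = 0 := by
      rcases hzero with h | h
      · exact h
      · exact absurd h ht0
    subst hh0
    have ht1 : 1 ≤ tail := by omega
    have htcast : -tail = -((tail.toNat : Nat) : Int) := by omega
    rw [htcast, PySem.List.slice_from_neg_natCast lines tail.toNat (by omega)]
    rw [show Int.toNat 0 = 0 from rfl, List.take_zero, List.map_nil, pv_join_empty,
      List.nil_append]
    intro heq
    have hlen := congrArg (fun x => x.toList.length) heq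
    simp only [String.toList_append, List.length_append] at hlen
    have hTne : (lines.drop (lines.length - tail.toNat)).map (pvClip m) ≠ [] := by
      simp only [ne_eq, List.map_eq_nil_iff, List.drop_eq_nil_iff]
      omega
    have e3 := pv_join_len "\n" ((lines.drop (lines.length - tail.toNat)).map (pvClip m)) hTne
    have e2 := pv_join_len "\n"
      (("... [" ++ PySem.Int.toStr (↑lines.length - 0 - tail) ++ " LIGNES MASQUÉES] ...") ::
        (lines.drop (lines.length - tail.toNat)).map (pvClip m)) (by simp)
    rw [e2, e3] at hlen
    simp only [List.map_cons, List.sum_cons, String.toList_append, List.length_append,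
      List.length_cons, List.length_map, List.length_drop, l1, l2, l3, l4, l5] at hlen
    have hT1 : 1 ≤ tail.toNat := by omega
    have hTl : tail.toNat < lines.length := by omega
    simp at hlen
    omega

-- ===== VERDICT (by name: the statement is the Claim_ definition above) =====
theorem truncate_log_spec : Claim_unchanged_truncate_log := by
  intro content head tail m _ hpre hnd
  exact pv_eq_alt content head tail m hpre.1 hpre.2 hnd

theorem truncate_log_changed : Claim_changed_truncate_log := by
  unfold Claim_changed_truncate_log; decide

theorem truncate_log_tight : Claim_exact_truncate_log := by
  intro content head tail m _ hpre hD
  exact pv_ne_inside content head tail m hpre.1 hpre.2 hD
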